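-- pv_equiv track=rewrite | github.com/wickyaf123/country_backend | services/bucket_classifier_service.py | classify_connection
-- ===== SOURCE A (Python) =====
-- from typing import Dict, List
--
-- def classify_connection(connection: Dict) -> str:
--     """
--     Classify connection into Country Rebel content bucket.
--     Uses rule-based + AI hybrid approach for accuracy and speed.
--
--     Args:
--         connection: Connection dict with type, description, entity
--
--     Returns:
--         Bucket name from COUNTRY_REBEL_BUCKETS
--     """
--     description = connection.get('description', '').lower()
--     conn_type = connection.get('type', '').lower()
--     entity = connection.get('entity', '').lower()
--
--     # Rule-based classification (fast path)
--
--     # Artist News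
--     if conn_type == 'artist' or any(word in description for word in [
--         'album', 'tour', 'single', 'release', 'record', 'song'
--     ]):
--         return "Artist News"
--
--     # Viral Moments
--     if conn_type == 'viral' or any(word in description for word in [
--         'viral', 'tiktok', 'trending', 'instagram', 'social media', 'video'
--     ]):
--         return "Viral Moments"
--
--     # Patriotic Content
--     if conn_type == 'patriotic' or any(word in description for word in [
--         'military', 'veteran', 'patriotic', 'flag', 'anthem', 'troops', 'army', 'navy'
--     ]):
--         return "Patriotic Content"
--
--     # Awards/Events
--     if conn_type == 'event' or any(word in description for word in [
--         'award', 'cma', 'acm', 'grammy', 'festival', 'concert', 'ceremony'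
--     ]):
--         return "Awards/Events"
--
--     # Lifestyle/Culture
--     if any(word in description for word in [
--         'faith', 'church', 'prayer', 'family', 'marriage', 'children', 'health'
--     ]):
--         return "Lifestyle/Culture"
--
--     # Legacy/Heritage
--     if any(word in description for word in [
--         'legacy', 'heritage', 'classic', 'traditional', 'history', 'pioneer'
--     ]):
--         return "Legacy/Heritage"
--
--     # Feel-Good Stories
--     if any(word in description for word in [
--         'kindness', 'charity', 'donation', 'help', 'support', 'fundraiser', 'gofundme'
--     ]):
--         return "Feel-Good Stories"
--
--     # Emerging Artists
--     if any(word in description for word in [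
--         'new artist', 'rising', 'emerging', 'debut', 'unsigned', 'discovery'
--     ]):
--         return "Emerging Artists"
--
--     # Interviews/Profiles
--     if any(word in description for word in [
--         'interview', 'profile', 'exclusive', 'behind the scenes', 'personal story'
--     ]):
--         return "Interviews/Profiles"
--
--     # Listicles (geographic, rankings)
--     if any(word in description for word in [
--         'texas', 'tennessee', 'nashville', 'top 10', 'best', 'list'
--     ]):
--         return "Listicles"
--
--     # Default fallback
--     return "News Aggregation"
-- ===== SOURCE B (Python) =====
-- # Different algorithm: instead of testing each keyword with a substring search
-- # rule by rule, scan the description once over all start positions, looking up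
-- # each candidate substring (one per keyword length) in a flat keyword->priority
-- # hash map, and keep the minimum priority seen; the type is one dict lookup.
-- # Correct because a keyword matches iff some substring of the description equals
-- # it, each keyword belongs to exactly one bucket, and the minimum matched
-- # priority is exactly the first rule A's ordered chain would fire.
--
-- BUCKETS = [
--     "Artist News", "Viral Moments", "Patriotic Content", "Awards/Events",
--     "Lifestyle/Culture", "Legacy/Heritage", "Feel-Good Stories",
--     "Emerging Artists", "Interviews/Profiles", "Listicles", "News Aggregation",
-- ]
--
-- TYPE_PRIO = {'artist': 0, 'viral': 1, 'patriotic': 2, 'event': 3}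
--
-- KW_PRIO = {}
-- for _p, _words in enumerate([
--     ['album', 'tour', 'single', 'release', 'record', 'song'],
--     ['viral', 'tiktok', 'trending', 'instagram', 'social media', 'video'],
--     ['military', 'veteran', 'patriotic', 'flag', 'anthem', 'troops', 'army', 'navy'],
--     ['award', 'cma', 'acm', 'grammy', 'festival', 'concert', 'ceremony'],
--     ['faith', 'church', 'prayer', 'family', 'marriage', 'children', 'health'],
--     ['legacy', 'heritage', 'classic', 'traditional', 'history', 'pioneer'],
--     ['kindness', 'charity', 'donation', 'help', 'support', 'fundraiser', 'gofundme'],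
--     ['new artist', 'rising', 'emerging', 'debut', 'unsigned', 'discovery'],
--     ['interview', 'profile', 'exclusive', 'behind the scenes', 'personal story'],
--     ['texas', 'tennessee', 'nashville', 'top 10', 'best', 'list'],
-- ]):
--     for _w in _words:
--         KW_PRIO[_w] = _p
--
-- LENS = sorted({len(w) for w in KW_PRIO})
--
--
-- def classify_connection(connection):
--     description = connection.get('description', '').lower()
--     conn_type = connection.get('type', '').lower()
--     best = TYPE_PRIO.get(conn_type, 10)
--     for i in range(len(description)):
--         for L in LENS:
--             p = KW_PRIO.get(description[i:i + L])
--             if p is not None and p < best: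
--                 best = p
--     return BUCKETS[best]
-- ===== Notes on version B (the rewrite author's own statement) =====
-- stated objective: alternative
-- what changed: Replaces the ordered first-match rule chain of per-keyword substring searches by a single scan over the description's start positions that looks each candidate substring up in a flat keyword-to-priority hash map and keeps the minimum matched priority (plus one type-dict lookup), indexing a bucket table with it.
import Mathlib
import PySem

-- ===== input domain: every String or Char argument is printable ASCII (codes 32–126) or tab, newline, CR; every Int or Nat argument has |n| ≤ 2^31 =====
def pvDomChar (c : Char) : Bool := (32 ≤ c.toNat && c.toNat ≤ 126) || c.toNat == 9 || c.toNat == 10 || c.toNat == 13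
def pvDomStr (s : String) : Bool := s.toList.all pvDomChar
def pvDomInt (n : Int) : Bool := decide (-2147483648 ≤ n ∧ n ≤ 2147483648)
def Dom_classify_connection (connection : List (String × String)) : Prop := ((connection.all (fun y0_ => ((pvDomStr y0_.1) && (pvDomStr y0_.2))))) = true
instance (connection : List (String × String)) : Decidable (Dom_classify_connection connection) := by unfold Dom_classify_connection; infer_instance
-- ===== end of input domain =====

-- B replaces A's ordered chain of per-keyword substring searches by one scan over the
-- description's start positions with hash-map lookups of candidate substrings, keeping the
-- minimum matched priority and indexing a bucket table with it (alternative algorithm).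

-- ===== PORT A =====
def classify_connection (connection : List (String × String)) : String :=
  let description := PySem.Str.lower (PySem.Dict.getD (PySem.Dict.mk connection) "description" "")
  let conn_type := PySem.Str.lower (PySem.Dict.getD (PySem.Dict.mk connection) "type" "")
  let _entity := PySem.Str.lower (PySem.Dict.getD (PySem.Dict.mk connection) "entity" "")
  if conn_type == "artist" || ["album", "tour", "single", "release", "record", "song"].any (fun w => PySem.Str.isIn w description) then "Artist News"
  else if conn_type == "viral" || ["viral", "tiktok", "trending", "instagram", "social media", "video"].any (fun w => PySem.Str.isIn w description) then "Viral Moments"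
  else if conn_type == "patriotic" || ["military", "veteran", "patriotic", "flag", "anthem", "troops", "army", "navy"].any (fun w => PySem.Str.isIn w description) then "Patriotic Content"
  else if conn_type == "event" || ["award", "cma", "acm", "grammy", "festival", "concert", "ceremony"].any (fun w => PySem.Str.isIn w description) then "Awards/Events"
  else if ["faith", "church", "prayer", "family", "marriage", "children", "health"].any (fun w => PySem.Str.isIn w description) then "Lifestyle/Culture"
  else if ["legacy", "heritage", "classic", "traditional", "history", "pioneer"].any (fun w => PySem.Str.isIn w description) then "Legacy/Heritage"
  else if ["kindness", "charity", "donation", "help", "support", "fundraiser", "gofundme"].any (fun w => PySem.Str.isIn w description) then "Feel-Good Stories"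
  else if ["new artist", "rising", "emerging", "debut", "unsigned", "discovery"].any (fun w => PySem.Str.isIn w description) then "Emerging Artists"
  else if ["interview", "profile", "exclusive", "behind the scenes", "personal story"].any (fun w => PySem.Str.isIn w description) then "Interviews/Profiles"
  else if ["texas", "tennessee", "nashville", "top 10", "best", "list"].any (fun w => PySem.Str.isIn w description) then "Listicles"
  else "News Aggregation"

-- ===== PORT B =====
def pvBuckets : List String :=
  ["Artist News", "Viral Moments", "Patriotic Content", "Awards/Events", "Lifestyle/Culture", "Legacy/Heritage", "Feel-Good Stories", "Emerging Artists", "Interviews/Profiles", "Listicles", "News Aggregation"]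

def pvTypePrio : PySem.Dict String Int :=
  PySem.Dict.mk [("artist", 0), ("viral", 1), ("patriotic", 2), ("event", 3)]

def pvKwList : List (String × Int) :=
  [("album", 0),
    ("tour", 0),
    ("single", 0),
    ("release", 0),
    ("record", 0),
    ("song", 0),
    ("viral", 1),
    ("tiktok", 1),
    ("trending", 1),
    ("instagram", 1),
    ("social media", 1),
    ("video", 1),
    ("military", 2),
    ("veteran", 2),
    ("patriotic", 2),
    ("flag", 2),
    ("anthem", 2),
    ("troops", 2),
    ("army", 2),
    ("navy", 2),
    ("award", 3),
    ("cma", 3),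
    ("acm", 3),
    ("grammy", 3),
    ("festival", 3),
    ("concert", 3),
    ("ceremony", 3),
    ("faith", 4),
    ("church", 4),
    ("prayer", 4),
    ("family", 4),
    ("marriage", 4),
    ("children", 4),
    ("health", 4),
    ("legacy", 5),
    ("heritage", 5),
    ("classic", 5),
    ("traditional", 5),
    ("history", 5),
    ("pioneer", 5),
    ("kindness", 6),
    ("charity", 6),
    ("donation", 6),
    ("help", 6),
    ("support", 6),
    ("fundraiser", 6),
    ("gofundme", 6),
    ("new artist", 7),
    ("rising", 7),
    ("emerging", 7),
    ("debut", 7),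
    ("unsigned", 7),
    ("discovery", 7),
    ("interview", 8),
    ("profile", 8),
    ("exclusive", 8),
    ("behind the scenes", 8),
    ("personal story", 8),
    ("texas", 9),
    ("tennessee", 9),
    ("nashville", 9),
    ("top 10", 9),
    ("best", 9),
    ("list", 9)]

def pvKw : PySem.Dict String Int := PySem.Dict.mk pvKwList

def pvLens : List Int := [3, 4, 5, 6, 7, 8, 9, 10, 11, 12, 14, 17]

def classify_connection_alt (connection : List (String × String)) : String :=
  let description := PySem.Str.lower (PySem.Dict.getD (PySem.Dict.mk connection) "description" "")
  let conn_type := PySem.Str.lower (PySem.Dict.getD (PySem.Dict.mk connection) "type" "")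
  let best0 : Int := PySem.Dict.getD pvTypePrio conn_type 10
  let best := (PySem.List.pyRange 0 (PySem.Str.len description) 1).foldl
    (fun b i => pvLens.foldl
      (fun b L =>
        match PySem.Dict.get? pvKw (PySem.Str.slice description (some i) (some (i + L))) with
        | some p => if p < b then p else b
        | none => b) b) best0
  -- BUCKETS[best]: best always lies in [0, 10], so Python's list indexing cannot raise
  (PySem.List.pyGet? pvBuckets best).getD "News Aggregation"

-- ===== PRECONDITION & SPEC =====
def Spec_classify_connection (connection : List (String × String)) (out : String) : Prop := out = classify_connection_alt connection
instance (connection : List (String × String)) (out : String) : Decidable (Spec_classify_connection connection out) := by unfold Spec_classify_connection; infer_instance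

-- ===== CLAIM (what is proved, stated in full; the proofs are below) =====
def Claim_equal_classify_connection : Prop := ∀ (connection : List (String × String)), Dom_classify_connection connection → Spec_classify_connection connection (classify_connection connection)

-- ===== LEMMAS AND PROOFS =====

-- proof-side views of B's computation
def pvHit (ds : String) (x : Int × Int) : Option Int :=
  PySem.Dict.get? pvKw (PySem.Str.slice ds (some x.1) (some (x.1 + x.2)))

def pvStep (ds : String) (b : Int) (x : Int × Int) : Int :=
  match pvHit ds x with
  | some p => if p < b then p else b
  | none => b

def pvPairs (ds : String) : List (Int × Int) :=
  (PySem.List.pyRange 0 (PySem.Str.len ds) 1).flatMap (fun i => pvLens.map (fun L => (i, L)))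

def pvBest (ct ds : String) : Int :=
  (pvPairs ds).foldl (pvStep ds) (PySem.Dict.getD pvTypePrio ct 10)

-- proof-side views of A's rule chain
def pvRuleWords : List (Int × List String) :=
  [(0, ["album", "tour", "single", "release", "record", "song"]),
    (1, ["viral", "tiktok", "trending", "instagram", "social media", "video"]),
    (2, ["military", "veteran", "patriotic", "flag", "anthem", "troops", "army", "navy"]),
    (3, ["award", "cma", "acm", "grammy", "festival", "concert", "ceremony"]),
    (4, ["faith", "church", "prayer", "family", "marriage", "children", "health"]),
    (5, ["legacy", "heritage", "classic", "traditional", "history", "pioneer"]),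
    (6, ["kindness", "charity", "donation", "help", "support", "fundraiser", "gofundme"]),
    (7, ["new artist", "rising", "emerging", "debut", "unsigned", "discovery"]),
    (8, ["interview", "profile", "exclusive", "behind the scenes", "personal story"]),
    (9, ["texas", "tennessee", "nashville", "top 10", "best", "list"])]

def pvFirst (ct ds : String) : Int :=
  if ct == "artist" || ["album", "tour", "single", "release", "record", "song"].any (fun w => PySem.Str.isIn w ds) then 0
  else if ct == "viral" || ["viral", "tiktok", "trending", "instagram", "social media", "video"].any (fun w => PySem.Str.isIn w ds) then 1
  else if ct == "patriotic" || ["military", "veteran", "patriotic", "flag", "anthem", "troops", "army", "navy"].any (fun w => PySem.Str.isIn w ds) then 2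
  else if ct == "event" || ["award", "cma", "acm", "grammy", "festival", "concert", "ceremony"].any (fun w => PySem.Str.isIn w ds) then 3
  else if ["faith", "church", "prayer", "family", "marriage", "children", "health"].any (fun w => PySem.Str.isIn w ds) then 4
  else if ["legacy", "heritage", "classic", "traditional", "history", "pioneer"].any (fun w => PySem.Str.isIn w ds) then 5
  else if ["kindness", "charity", "donation", "help", "support", "fundraiser", "gofundme"].any (fun w => PySem.Str.isIn w ds) then 6
  else if ["new artist", "rising", "emerging", "debut", "unsigned", "discovery"].any (fun w => PySem.Str.isIn w ds) then 7
  else if ["interview", "profile", "exclusive", "behind the scenes", "personal story"].any (fun w => PySem.Str.isIn w ds) then 8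
  else if ["texas", "tennessee", "nashville", "top 10", "best", "list"].any (fun w => PySem.Str.isIn w ds) then 9
  else 10

-- fold-minimum facts
theorem pvStep_le (ds : String) (b : Int) (x : Int × Int) : pvStep ds b x ≤ b := by
  unfold pvStep
  split
  · split <;> omega
  · omega

theorem pvStep_le_hit (ds : String) (b : Int) {x : Int × Int} {p : Int}
    (hp : pvHit ds x = some p) : pvStep ds b x ≤ p := by
  unfold pvStep
  simp only [hp]
  split <;> omega

theorem pvStep_eq (ds : String) (b : Int) (x : Int × Int) :
    pvStep ds b x = b ∨ pvHit ds x = some (pvStep ds b x) := by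
  unfold pvStep
  split
  · next p heq =>
    split
    · right; exact heq
    · left; rfl
  · left; rfl

theorem foldmin_le_init (ds : String) (l : List (Int × Int)) (init : Int) :
    l.foldl (pvStep ds) init ≤ init := by
  induction l generalizing init with
  | nil => simp
  | cons x l ih => exact le_trans (ih _) (pvStep_le ds init x)

theorem foldmin_le_hit (ds : String) {x : Int × Int} {p : Int} (hp : pvHit ds x = some p) :
    ∀ (l : List (Int × Int)) (init : Int), x ∈ l → l.foldl (pvStep ds) init ≤ p := by
  intro l
  induction l with
  | nil => intro init hx; cases hx
  | cons y l ih =>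
    intro init hx
    rcases List.mem_cons.mp hx with rfl | hmem
    · exact le_trans (foldmin_le_init ds l _) (pvStep_le_hit ds init hp)
    · exact ih _ hmem

theorem foldmin_cases (ds : String) (l : List (Int × Int)) (init : Int) :
    l.foldl (pvStep ds) init = init ∨ ∃ x ∈ l, pvHit ds x = some (l.foldl (pvStep ds) init) := by
  induction l generalizing init with
  | nil => left; rfl
  | cons y l ih =>
    rcases ih (pvStep ds init y) with h | ⟨x, hx, hp⟩
    · rcases pvStep_eq ds init y with he | hs
      · left; rw [List.foldl_cons, h, he]
      · right; exact ⟨y, List.mem_cons_self, by rw [List.foldl_cons, h]; exact hs⟩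
    · right; exact ⟨x, List.mem_cons_of_mem _ hx, hp⟩

theorem fold_flatten (ds : String) (outer : List Int) (init : Int) :
    outer.foldl
      (fun b i => pvLens.foldl
        (fun b L =>
          match PySem.Dict.get? pvKw (PySem.Str.slice ds (some i) (some (i + L))) with
          | some p => if p < b then p else b
          | none => b) b) init
    = (outer.flatMap (fun i => pvLens.map (fun L => (i, L)))).foldl (pvStep ds) init := by
  induction outer generalizing init with
  | nil => rfl
  | cons i outer ih =>
    simp only [List.foldl_cons, List.flatMap_cons, List.foldl_append, List.foldl_map, ih]
    rfl

-- literal-table facts (checked by the kernel)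
theorem kwfacts : ∀ wp ∈ pvKwList, 0 < wp.1.toList.length ∧ ((wp.1.toList.length : Int) ∈ pvLens) ∧ PySem.Dict.get? pvKw wp.1 = some wp.2 := by decide

theorem lens_pos : ∀ L ∈ pvLens, 0 < L := by decide

theorem kw_to_rule : ∀ wp ∈ pvKwList, ∃ pws ∈ pvRuleWords, wp.2 = pws.1 ∧ wp.1 ∈ pws.2 := by decide

theorem rule_to_kw : ∀ pws ∈ pvRuleWords, ∀ w ∈ pws.2, (w, pws.1) ∈ pvKwList := by decide

theorem sound (ds : String) {x : Int × Int} {p : Int} (hx : x ∈ pvPairs ds)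
    (hp : pvHit ds x = some p) : ∃ w, (w, p) ∈ pvKwList ∧ PySem.Str.isIn w ds = true := by
  obtain ⟨i, hi, hx2⟩ := List.mem_flatMap.mp hx
  obtain ⟨L, hL, rfl⟩ := List.mem_map.mp hx2
  have h0i : 0 ≤ i := (PySem.List.mem_pyRange_one.mp hi).1
  have h0L : 0 < L := lens_pos L hL
  refine ⟨PySem.Str.slice ds (some i) (some (i + L)), PySem.Dict.mem_items_of_get?_eq_some pvKw hp, ?_⟩
  rw [PySem.Str.isIn_iff_infix, PySem.Str.toList_slice, PySem.Chars.slice_eq_listSlice,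
    PySem.List.slice_toNat _ h0i (by omega)]
  exact ((List.take_prefix _ _).isInfix).trans ((List.drop_suffix _ _).isInfix)

theorem complete (ds : String) {w : String} {p : Int} (hwp : (w, p) ∈ pvKwList)
    (hin : PySem.Str.isIn w ds = true) : ∃ x ∈ pvPairs ds, pvHit ds x = some p := by
  obtain ⟨hlen, hmemL, hget⟩ := kwfacts _ hwp
  dsimp only at hlen hmemL hget
  obtain ⟨s, t, hst⟩ := (PySem.Str.isIn_iff_infix w ds).mp hin
  refine ⟨((s.length : Int), (w.toList.length : Int)), ?_, ?_⟩
  · refine List.mem_flatMap.mpr ⟨(s.length : Int), ?_, List.mem_map.mpr ⟨_, hmemL, rfl⟩⟩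
    refine PySem.List.mem_pyRange_one.mpr ⟨by positivity, ?_⟩
    have hds : ds.toList.length = s.length + (w.toList.length + t.length) := by
      rw [← hst]; simp
    have : PySem.Str.len ds = (ds.toList.length : Int) := by
      simp [PySem.Str.len_eq]
    rw [this, hds]
    push_cast
    omega
  · have hslice : PySem.Str.slice ds (some (s.length : Int)) (some ((s.length : Int) + (w.toList.length : Int))) = w := by
      rw [← String.toList_inj, PySem.Str.toList_slice, PySem.Chars.slice_eq_listSlice,
        PySem.List.slice_natCast_add, ← hst, List.append_assoc, List.drop_left, List.take_left]
    unfold pvHit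
    dsimp only
    rw [hslice]
    exact hget

-- TYPE_PRIO.get(conn_type, 10) evaluated on the four keys
theorem type_eval (ct : String) :
    PySem.Dict.getD pvTypePrio ct 10 =
      if ct == "artist" then 0 else if ct == "viral" then 1
      else if ct == "patriotic" then 2 else if ct == "event" then 3 else 10 := by
  by_cases h1 : ct = "artist"
  · subst h1; decide
  by_cases h2 : ct = "viral"
  · subst h2; decide
  by_cases h3 : ct = "patriotic"
  · subst h3; decide
  by_cases h4 : ct = "event"
  · subst h4; decide
  have e1 : (("artist" : String) == ct) = false := beq_eq_false_iff_ne.mpr (Ne.symm h1)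
  have e2 : (("viral" : String) == ct) = false := beq_eq_false_iff_ne.mpr (Ne.symm h2)
  have e3 : (("patriotic" : String) == ct) = false := beq_eq_false_iff_ne.mpr (Ne.symm h3)
  have e4 : (("event" : String) == ct) = false := beq_eq_false_iff_ne.mpr (Ne.symm h4)
  have f1 : (ct == ("artist" : String)) = false := beq_eq_false_iff_ne.mpr h1
  have f2 : (ct == ("viral" : String)) = false := beq_eq_false_iff_ne.mpr h2
  have f3 : (ct == ("patriotic" : String)) = false := beq_eq_false_iff_ne.mpr h3
  have f4 : (ct == ("event" : String)) = false := beq_eq_false_iff_ne.mpr h4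
  simp only [pvTypePrio, PySem.Dict.getD_eq_get?_getD, PySem.Dict.get?_mk_cons,
    e1, e2, e3, e4, f1, f2, f3, f4, Bool.false_eq_true, if_false]
  rfl

set_option maxHeartbeats 1000000 in
theorem first_le_0 (ct ds : String) (h : (ct == "artist" || ["album", "tour", "single", "release", "record", "song"].any (fun w => PySem.Str.isIn w ds)) = true) : pvFirst ct ds ≤ 0 := by
  unfold pvFirst
  split_ifs <;> omega

set_option maxHeartbeats 1000000 in
theorem first_le_1 (ct ds : String) (h : (ct == "viral" || ["viral", "tiktok", "trending", "instagram", "social media", "video"].any (fun w => PySem.Str.isIn w ds)) = true) : pvFirst ct ds ≤ 1 := by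
  unfold pvFirst
  split_ifs <;> omega

set_option maxHeartbeats 1000000 in
theorem first_le_2 (ct ds : String) (h : (ct == "patriotic" || ["military", "veteran", "patriotic", "flag", "anthem", "troops", "army", "navy"].any (fun w => PySem.Str.isIn w ds)) = true) : pvFirst ct ds ≤ 2 := by
  unfold pvFirst
  split_ifs <;> omega

set_option maxHeartbeats 1000000 in
theorem first_le_3 (ct ds : String) (h : (ct == "event" || ["award", "cma", "acm", "grammy", "festival", "concert", "ceremony"].any (fun w => PySem.Str.isIn w ds)) = true) : pvFirst ct ds ≤ 3 := by
  unfold pvFirst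
  split_ifs <;> omega

set_option maxHeartbeats 1000000 in
theorem first_le_4 (ct ds : String) (h : (["faith", "church", "prayer", "family", "marriage", "children", "health"].any (fun w => PySem.Str.isIn w ds)) = true) : pvFirst ct ds ≤ 4 := by
  unfold pvFirst
  split_ifs <;> omega

set_option maxHeartbeats 1000000 in
theorem first_le_5 (ct ds : String) (h : (["legacy", "heritage", "classic", "traditional", "history", "pioneer"].any (fun w => PySem.Str.isIn w ds)) = true) : pvFirst ct ds ≤ 5 := by
  unfold pvFirst
  split_ifs <;> omega

set_option maxHeartbeats 1000000 in
theorem first_le_6 (ct ds : String) (h : (["kindness", "charity", "donation", "help", "support", "fundraiser", "gofundme"].any (fun w => PySem.Str.isIn w ds)) = true) : pvFirst ct ds ≤ 6 := by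
  unfold pvFirst
  split_ifs <;> omega

set_option maxHeartbeats 1000000 in
theorem first_le_7 (ct ds : String) (h : (["new artist", "rising", "emerging", "debut", "unsigned", "discovery"].any (fun w => PySem.Str.isIn w ds)) = true) : pvFirst ct ds ≤ 7 := by
  unfold pvFirst
  split_ifs <;> omega

set_option maxHeartbeats 1000000 in
theorem first_le_8 (ct ds : String) (h : (["interview", "profile", "exclusive", "behind the scenes", "personal story"].any (fun w => PySem.Str.isIn w ds)) = true) : pvFirst ct ds ≤ 8 := by
  unfold pvFirst
  split_ifs <;> omega

set_option maxHeartbeats 1000000 in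
theorem first_le_9 (ct ds : String) (h : (["texas", "tennessee", "nashville", "top 10", "best", "list"].any (fun w => PySem.Str.isIn w ds)) = true) : pvFirst ct ds ≤ 9 := by
  unfold pvFirst
  split_ifs <;> omega

set_option maxHeartbeats 1000000 in
theorem first_le_10 (ct ds : String) : pvFirst ct ds ≤ 10 := by
  unfold pvFirst
  split_ifs <;> omega

theorem best_le_rule (ct ds : String) {p : Int} {ws : List String} (hpw : (p, ws) ∈ pvRuleWords)
    (h : ws.any (fun w => PySem.Str.isIn w ds) = true) : pvBest ct ds ≤ p := by
  obtain ⟨w, hw, hin⟩ := List.any_eq_true.mp h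
  obtain ⟨x, hx, hhit⟩ := complete ds (rule_to_kw _ hpw w hw) hin
  exact foldmin_le_hit ds hhit _ _ hx

theorem best_le_type (ds : String) (t : String) {k : Int}
    (hk : PySem.Dict.getD pvTypePrio t 10 = k) : pvBest t ds ≤ k := by
  unfold pvBest
  rw [hk] at *
  exact le_of_le_of_eq (foldmin_le_init ds _ _) hk

theorem best_le_first (ct ds : String) : pvBest ct ds ≤ pvFirst ct ds := by
  unfold pvFirst
  split_ifs with h0 h1 h2 h3 h4 h5 h6 h7 h8 h9
  · rw [Bool.or_eq_true] at h0
    rcases h0 with ht | ha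
    · have hct : ct = "artist" := by simpa using ht
      subst hct
      exact best_le_type ds _ (by decide)
    · exact best_le_rule ct ds (p := 0) (by decide) ha
  · rw [Bool.or_eq_true] at h1
    rcases h1 with ht | ha
    · have hct : ct = "viral" := by simpa using ht
      subst hct
      exact best_le_type ds _ (by decide)
    · exact best_le_rule ct ds (p := 1) (by decide) ha
  · rw [Bool.or_eq_true] at h2
    rcases h2 with ht | ha
    · have hct : ct = "patriotic" := by simpa using ht
      subst hct
      exact best_le_type ds _ (by decide)
    · exact best_le_rule ct ds (p := 2) (by decide) ha
  · rw [Bool.or_eq_true] at h3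
    rcases h3 with ht | ha
    · have hct : ct = "event" := by simpa using ht
      subst hct
      exact best_le_type ds _ (by decide)
    · exact best_le_rule ct ds (p := 3) (by decide) ha
  · exact best_le_rule ct ds (p := 4) (by decide) h4
  · exact best_le_rule ct ds (p := 5) (by decide) h5
  · exact best_le_rule ct ds (p := 6) (by decide) h6
  · exact best_le_rule ct ds (p := 7) (by decide) h7
  · exact best_le_rule ct ds (p := 8) (by decide) h8
  · exact best_le_rule ct ds (p := 9) (by decide) h9
  · refine le_trans (foldmin_le_init ds _ _) ?_
    rw [type_eval]
    split_ifs <;> omega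

theorem first_le_best (ct ds : String) : pvFirst ct ds ≤ pvBest ct ds := by
  rcases foldmin_cases ds (pvPairs ds) (PySem.Dict.getD pvTypePrio ct 10) with hb | ⟨x, hx, hp⟩
  · unfold pvBest
    rw [hb, type_eval]
    split_ifs with c1 c2 c3 c4
    · exact first_le_0 ct ds (by rw [Bool.or_eq_true]; left; exact c1)
    · exact first_le_1 ct ds (by rw [Bool.or_eq_true]; left; exact c2)
    · exact first_le_2 ct ds (by rw [Bool.or_eq_true]; left; exact c3)
    · exact first_le_3 ct ds (by rw [Bool.or_eq_true]; left; exact c4)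
    · exact first_le_10 ct ds
  · obtain ⟨w, hwp, hin⟩ := sound ds hx hp
    obtain ⟨pws, hpws, hpeq, hwmem⟩ := kw_to_rule _ hwp
    have hany : pws.2.any (fun w => PySem.Str.isIn w ds) = true :=
      List.any_eq_true.mpr ⟨w, hwmem, hin⟩
    have hb2 : pvBest ct ds = pws.1 := hpeq
    rw [hb2]
    fin_cases hpws
    · exact first_le_0 ct ds (by rw [Bool.or_eq_true]; right; exact hany)
    · exact first_le_1 ct ds (by rw [Bool.or_eq_true]; right; exact hany)
    · exact first_le_2 ct ds (by rw [Bool.or_eq_true]; right; exact hany)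
    · exact first_le_3 ct ds (by rw [Bool.or_eq_true]; right; exact hany)
    · exact first_le_4 ct ds hany
    · exact first_le_5 ct ds hany
    · exact first_le_6 ct ds hany
    · exact first_le_7 ct ds hany
    · exact first_le_8 ct ds hany
    · exact first_le_9 ct ds hany

theorem best_eq_first (ct ds : String) : pvBest ct ds = pvFirst ct ds :=
  le_antisymm (best_le_first ct ds) (first_le_best ct ds)

set_option maxHeartbeats 1000000 in
theorem chain_eq (ct ds : String) :
    (if ct == "artist" || ["album", "tour", "single", "release", "record", "song"].any (fun w => PySem.Str.isIn w ds) then "Artist News"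
     else if ct == "viral" || ["viral", "tiktok", "trending", "instagram", "social media", "video"].any (fun w => PySem.Str.isIn w ds) then "Viral Moments"
     else if ct == "patriotic" || ["military", "veteran", "patriotic", "flag", "anthem", "troops", "army", "navy"].any (fun w => PySem.Str.isIn w ds) then "Patriotic Content"
     else if ct == "event" || ["award", "cma", "acm", "grammy", "festival", "concert", "ceremony"].any (fun w => PySem.Str.isIn w ds) then "Awards/Events"
     else if ["faith", "church", "prayer", "family", "marriage", "children", "health"].any (fun w => PySem.Str.isIn w ds) then "Lifestyle/Culture"
     else if ["legacy", "heritage", "classic", "traditional", "history", "pioneer"].any (fun w => PySem.Str.isIn w ds) then "Legacy/Heritage"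
     else if ["kindness", "charity", "donation", "help", "support", "fundraiser", "gofundme"].any (fun w => PySem.Str.isIn w ds) then "Feel-Good Stories"
     else if ["new artist", "rising", "emerging", "debut", "unsigned", "discovery"].any (fun w => PySem.Str.isIn w ds) then "Emerging Artists"
     else if ["interview", "profile", "exclusive", "behind the scenes", "personal story"].any (fun w => PySem.Str.isIn w ds) then "Interviews/Profiles"
     else if ["texas", "tennessee", "nashville", "top 10", "best", "list"].any (fun w => PySem.Str.isIn w ds) then "Listicles"
     else "News Aggregation")
    = (PySem.List.pyGet? pvBuckets (pvFirst ct ds)).getD "News Aggregation" := by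
  unfold pvFirst
  split_ifs <;> rfl

set_option maxHeartbeats 1000000 in
theorem core_eq (ct ds : String) :
    (if ct == "artist" || ["album", "tour", "single", "release", "record", "song"].any (fun w => PySem.Str.isIn w ds) then "Artist News"
     else if ct == "viral" || ["viral", "tiktok", "trending", "instagram", "social media", "video"].any (fun w => PySem.Str.isIn w ds) then "Viral Moments"
     else if ct == "patriotic" || ["military", "veteran", "patriotic", "flag", "anthem", "troops", "army", "navy"].any (fun w => PySem.Str.isIn w ds) then "Patriotic Content"
     else if ct == "event" || ["award", "cma", "acm", "grammy", "festival", "concert", "ceremony"].any (fun w => PySem.Str.isIn w ds) then "Awards/Events"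
     else if ["faith", "church", "prayer", "family", "marriage", "children", "health"].any (fun w => PySem.Str.isIn w ds) then "Lifestyle/Culture"
     else if ["legacy", "heritage", "classic", "traditional", "history", "pioneer"].any (fun w => PySem.Str.isIn w ds) then "Legacy/Heritage"
     else if ["kindness", "charity", "donation", "help", "support", "fundraiser", "gofundme"].any (fun w => PySem.Str.isIn w ds) then "Feel-Good Stories"
     else if ["new artist", "rising", "emerging", "debut", "unsigned", "discovery"].any (fun w => PySem.Str.isIn w ds) then "Emerging Artists"
     else if ["interview", "profile", "exclusive", "behind the scenes", "personal story"].any (fun w => PySem.Str.isIn w ds) then "Interviews/Profiles"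
     else if ["texas", "tennessee", "nashville", "top 10", "best", "list"].any (fun w => PySem.Str.isIn w ds) then "Listicles"
     else "News Aggregation")
    = (PySem.List.pyGet? pvBuckets ((PySem.List.pyRange 0 (PySem.Str.len ds) 1).foldl
        (fun b i => pvLens.foldl
          (fun b L =>
            match PySem.Dict.get? pvKw (PySem.Str.slice ds (some i) (some (i + L))) with
            | some p => if p < b then p else b
            | none => b) b) (PySem.Dict.getD pvTypePrio ct 10))).getD "News Aggregation" := by
  rw [fold_flatten]
  rw [show ((PySem.List.pyRange 0 (PySem.Str.len ds) 1).flatMap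
        (fun i => pvLens.map (fun L => (i, L)))).foldl (pvStep ds) (PySem.Dict.getD pvTypePrio ct 10)
      = pvBest ct ds from rfl]
  rw [best_eq_first]
  exact chain_eq ct ds

-- ===== VERDICT (by name: the statement is the Claim_ definition above) =====
theorem classify_connection_spec : Claim_equal_classify_connection := by
  intro connection _
  unfold Spec_classify_connection
  exact core_eq (PySem.Str.lower (PySem.Dict.getD (PySem.Dict.mk connection) "type" ""))
    (PySem.Str.lower (PySem.Dict.getD (PySem.Dict.mk connection) "description" ""))
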